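-- pv_equiv track=rewrite | github.com/ICEZACK1028/LFP_1S2024_202202077 | Proyecto_2/classes/Analizador_expresiones.py | reemplazar_comillas
-- ===== SOURCE A (Python) =====
-- def reemplazar_comillas(texto):
--     nuevo_texto = ""
--     dentro_comillas = False
--
--     for caracter in texto:
--         if caracter == '"':
--             dentro_comillas = not dentro_comillas
--             if dentro_comillas:
--                 nuevo_texto += '('
--             else:
--                 nuevo_texto += ')'
--         else:
--             nuevo_texto += caracter
--
--     return nuevo_texto
-- ===== SOURCE B (Python) =====
-- def reemplazar_comillas(texto):
--     parts = texto.split('"')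
--     out = [parts[0]]
--     for i, part in enumerate(parts[1:]):
--         out.append('(' if i % 2 == 0 else ')')
--         out.append(part)
--     return ''.join(out)
-- ===== Notes on version B (the rewrite author's own statement) =====
-- stated objective: idiomatic
-- what changed: Replaces the character-by-character state machine with a single split on the quote character and a reassembly of the segments joined by alternating opening/closing parentheses.
import Mathlib
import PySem

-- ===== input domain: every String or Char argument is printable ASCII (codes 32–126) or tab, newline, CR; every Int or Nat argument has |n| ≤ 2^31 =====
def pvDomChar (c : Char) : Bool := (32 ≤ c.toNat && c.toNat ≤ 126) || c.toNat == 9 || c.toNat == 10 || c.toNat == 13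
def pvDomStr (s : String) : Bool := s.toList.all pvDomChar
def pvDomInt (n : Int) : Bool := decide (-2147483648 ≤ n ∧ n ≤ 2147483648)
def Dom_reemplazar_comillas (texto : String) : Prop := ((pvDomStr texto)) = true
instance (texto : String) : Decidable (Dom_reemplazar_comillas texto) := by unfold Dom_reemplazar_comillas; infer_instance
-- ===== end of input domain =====

-- B replaces A's character-by-character quote state machine by split-on-'"' then
-- reassembly with alternating '(' / ')' separators (idiomatic decomposition).

-- ===== PORT A =====
-- literal port of A's loop: string accumulator (as List Char) + dentro_comillas flag
def reemplazar_comillas (texto : String) : String :=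
  let r := texto.toList.foldl
    (fun (st : List Char × Bool) caracter =>
      if caracter = '"' then
        let dentro := !st.2
        (st.1 ++ [if dentro then '(' else ')'], dentro)
      else
        (st.1 ++ [caracter], st.2))
    ([], false)
  String.ofList r.1

-- ===== PORT B =====
-- texto.split('"'): exact port of Python str.split with the one-char separator '"'
-- (split("") = [""], separator characters dropped)
def pvSplitQ : List Char → List (List Char)
  | [] => [[]]
  | c :: cs =>
    if c = '"' then [] :: pvSplitQ cs
    else
      match pvSplitQ cs with
      | [] => [[c]]   -- unreachable: pvSplitQ never returns []
      | p :: ps => (c :: p) :: ps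

-- the enumerate loop of Source B: gap index i, '(' when i is even else ')', then the part
def pvJoinParts : Nat → List (List Char) → List Char
  | _, [] => []
  | i, p :: ps => (if i % 2 = 0 then '(' else ')') :: (p ++ pvJoinParts (i + 1) ps)

def reemplazar_comillas_alt (texto : String) : String :=
  match pvSplitQ texto.toList with
  | [] => ""          -- unreachable
  | p :: ps => String.ofList (p ++ pvJoinParts 0 ps)

-- ===== PRECONDITION & SPEC =====
def Spec_reemplazar_comillas (texto : String) (out : String) : Prop := out = reemplazar_comillas_alt texto
instance (texto : String) (out : String) : Decidable (Spec_reemplazar_comillas texto out) := by unfold Spec_reemplazar_comillas; infer_instance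

-- ===== CLAIM (what is proved, stated in full; the proofs are below) =====
def Claim_equal_reemplazar_comillas : Prop := ∀ (texto : String), Dom_reemplazar_comillas texto → Spec_reemplazar_comillas texto (reemplazar_comillas texto)

-- ===== LEMMAS AND PROOFS =====

-- canonical recursion both ports reduce to
def pvCanon : List Char → Bool → List Char
  | [], _ => []
  | c :: cs, b =>
    if c = '"' then (if b then ')' else '(') :: pvCanon cs (!b)
    else c :: pvCanon cs b

theorem pvSplitQ_ne_nil (cs : List Char) : pvSplitQ cs ≠ [] := by
  cases cs with
  | nil => simp [pvSplitQ]
  | cons c cs =>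
    simp only [pvSplitQ]
    split
    · simp
    · split <;> simp

theorem pvFoldA (cs : List Char) : ∀ (acc : List Char) (b : Bool),
    (cs.foldl
      (fun (st : List Char × Bool) caracter =>
        if caracter = '"' then
          let dentro := !st.2
          (st.1 ++ [if dentro then '(' else ')'], dentro)
        else
          (st.1 ++ [caracter], st.2))
      (acc, b)).1 = acc ++ pvCanon cs b := by
  induction cs with
  | nil => intro acc b; simp [pvCanon]
  | cons c cs ih =>
    intro acc b
    by_cases h : c = '"'
    · simp only [List.foldl, h, pvCanon, ih]
      cases b <;> simp
    · simp only [List.foldl, pvCanon, if_neg h, ih]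
      simp

theorem pvJoinB (cs : List Char) : ∀ (i : Nat),
    (match pvSplitQ cs with
     | [] => []
     | p :: ps => p ++ pvJoinParts i ps) = pvCanon cs (decide (i % 2 = 1)) := by
  induction cs with
  | nil => intro i; simp [pvSplitQ, pvJoinParts, pvCanon]
  | cons c cs ih =>
    intro i
    have hne := pvSplitQ_ne_nil cs
    by_cases h : c = '"'
    · subst h
      cases hq : pvSplitQ cs with
      | nil => exact absurd hq hne
      | cons p ps =>
        have hIH := ih (i + 1)
        rw [hq] at hIH
        simp only [] at hIH
        rcases Nat.mod_two_eq_zero_or_one i with h' | h'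
        · have h2 : (i + 1) % 2 = 1 := by omega
          simp only [h2] at hIH
          simp [pvSplitQ, hq, pvJoinParts, pvCanon, h', hIH]
        · have h2 : (i + 1) % 2 = 0 := by omega
          simp only [h2] at hIH
          simp [pvSplitQ, hq, pvJoinParts, pvCanon, h', hIH]
    · cases hq : pvSplitQ cs with
      | nil => exact absurd hq hne
      | cons p ps =>
        have hIH := ih i
        rw [hq] at hIH
        simp only [] at hIH
        simp [pvSplitQ, h, hq, pvCanon, hIH]

-- ===== VERDICT =====
theorem reemplazar_comillas_spec : Claim_equal_reemplazar_comillas := by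
  intro texto _
  unfold Spec_reemplazar_comillas reemplazar_comillas reemplazar_comillas_alt
  have hA := pvFoldA texto.toList [] false
  have hB := pvJoinB texto.toList 0
  simp only [List.nil_append] at hA
  simp only [hA]
  have hne := pvSplitQ_ne_nil texto.toList
  cases hq : pvSplitQ texto.toList with
  | nil => exact absurd hq hne
  | cons p ps =>
    rw [hq] at hB
    simp only [Nat.zero_mod] at hB
    norm_num at hB
    show String.ofList (pvCanon texto.toList false) = String.ofList (p ++ pvJoinParts 0 ps)
    rw [hB]
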